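-- pv_equiv track=rewrite | github.com/poomsakk/python-grader-datastruc-KMITL | C2_2 weirdSubtract.py | weirdSubtract
-- ===== SOURCE A (Python) =====
-- def weirdSubtract(n, k):
--     while(k > 0):
--         k -= 1
--         if n % 10 == 0:
--             n = int(n/10)
--         else:
--             n -= 1
--     return n
-- ===== SOURCE B (Python) =====
-- def weirdSubtract(n, k):
--     # batch re-implementation: jump to the next multiple of 10 in one step,
--     # short-circuit once n reaches 0 (it stays 0 forever under A's rule)
--     while k > 0:
--         if n == 0:
--             return 0
--         r = n % 10
--         if r == 0:
--             n = int(n / 10)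
--             k -= 1
--         else:
--             t = min(r, k)
--             n -= t
--             k -= t
--     return n
-- ===== Notes on version B (the rewrite author's own statement) =====
-- stated objective: faster
-- what changed: Instead of decrementing one unit per iteration, B batches all decrements down to the next multiple of 10 in one arithmetic step (t = min(n % 10, k)) and short-circuits to 0 once n hits 0, so it does O(log n + k/10) loop iterations instead of O(k).
import Mathlib
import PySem

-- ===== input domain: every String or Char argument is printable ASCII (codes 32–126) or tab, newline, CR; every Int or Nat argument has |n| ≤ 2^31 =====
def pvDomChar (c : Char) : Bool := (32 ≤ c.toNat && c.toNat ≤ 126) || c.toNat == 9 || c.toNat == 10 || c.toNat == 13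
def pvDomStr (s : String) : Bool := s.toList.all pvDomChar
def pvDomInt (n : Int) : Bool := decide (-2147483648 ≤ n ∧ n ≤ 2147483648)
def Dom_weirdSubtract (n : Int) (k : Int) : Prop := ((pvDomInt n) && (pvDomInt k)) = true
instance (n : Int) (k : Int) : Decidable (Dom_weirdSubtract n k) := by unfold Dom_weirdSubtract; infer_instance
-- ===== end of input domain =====

-- B batches the unit decrements of A down to the next multiple of 10 in one
-- arithmetic step and short-circuits once n = 0; fewer loop iterations, same value.

-- ===== PORT A =====
-- the while loop runs exactly k.toNat times (k -= 1 each iteration, guard k > 0);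
-- n % 10 with positive divisor 10: Python floor mod = Lean emod (%);
-- int(n/10) truncates toward zero = Int.tdiv (exact on |n| ≤ 2^31, within float precision,
-- and only reached when 10 ∣ n anyway)
def wsA_go : Int → Nat → Int
  | n, 0 => n
  | n, (k+1) => wsA_go (if n % 10 = 0 then n.tdiv 10 else n - 1) k

def weirdSubtract (n : Int) (k : Int) : Int := wsA_go n k.toNat

-- ===== PORT B =====
-- transliteration of Source B: fuel = k.toNat; batch step t = min (n % 10) k
def wsB_go (n : Int) (k : Nat) : Int :=
  if _hk : k = 0 then n
  else if n = 0 then 0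
  else
    let r := n % 10
    if hr : r = 0 then wsB_go (n.tdiv 10) (k - 1)
    else
      let t := min r (k : Int)
      wsB_go (n - t) (k - t.toNat)
termination_by k
decreasing_by
  · omega
  · have h1 : 0 ≤ n % 10 := Int.emod_nonneg n (by norm_num)
    omega

def weirdSubtract_alt (n : Int) (k : Int) : Int := wsB_go n k.toNat

-- ===== PRECONDITION & SPEC =====
def Spec_weirdSubtract (n : Int) (k : Int) (out : Int) : Prop := out = weirdSubtract_alt n k
instance (n : Int) (k : Int) (out : Int) : Decidable (Spec_weirdSubtract n k out) := by unfold Spec_weirdSubtract; infer_instance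

-- ===== CLAIM (what is proved, stated in full; the proofs are below) =====
def Claim_equal_weirdSubtract : Prop := ∀ (n : Int) (k : Int), Dom_weirdSubtract n k → Spec_weirdSubtract n k (weirdSubtract n k)

-- ===== LEMMAS AND PROOFS =====

-- once n = 0 it stays 0 in A's loop
theorem wsA_go_zero (k : Nat) : wsA_go 0 k = 0 := by
  induction k with
  | zero => rfl
  | succ k ih => simpa [wsA_go] using ih

-- t unit decrements of A (all on non-multiples of 10) collapse to one subtraction
theorem wsA_go_chunk (t : Nat) (n : Int) (k : Nat) (h : (t : Int) ≤ n % 10) :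
    wsA_go n (t + k) = wsA_go (n - t) k := by
  induction t generalizing n with
  | zero => simp
  | succ t ih =>
      have hne : ¬ n % 10 = 0 := by omega
      have hstep : wsA_go n (t + 1 + k) = wsA_go (n - 1) (t + k) := by
        have : t + 1 + k = (t + k) + 1 := by omega
        rw [this]
        simp [wsA_go, hne]
      rw [hstep, ih (n - 1) (by omega)]
      congr 1
      push_cast
      ring

theorem wsA_eq_wsB (k : Nat) : ∀ n, wsA_go n k = wsB_go n k := by
  induction k using Nat.strong_induction_on with
  | _ k ih =>
    intro n
    match hk : k with
    | 0 => simp [wsA_go, wsB_go]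
    | Nat.succ m =>
      by_cases hn : n = 0
      · subst hn
        rw [wsB_go]
        simp [wsA_go_zero]
      · by_cases hr : n % 10 = 0
        · rw [wsB_go]
          simp only [Nat.succ_ne_zero, dite_false, hn, if_false, hr, dite_true]
          show wsA_go (if n % 10 = 0 then n.tdiv 10 else n - 1) m = _
          rw [if_pos hr]
          exact ih m (by omega) _
        · have h0 : 0 ≤ n % 10 := Int.emod_nonneg n (by norm_num)
          have hlt : n % 10 < 10 := Int.emod_lt_of_pos n (by norm_num)
          set t : Int := min (n % 10) ((m + 1 : Nat) : Int) with ht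
          have ht1 : 1 ≤ t := by simp only [ht]; omega
          have htle : t ≤ n % 10 := min_le_left _ _
          have htk : t ≤ ((m + 1 : Nat) : Int) := min_le_right _ _
          have htn : (t.toNat : Int) = t := Int.toNat_of_nonneg (by omega)
          have hB : wsB_go n (m + 1) = wsB_go (n - t) (m + 1 - t.toNat) := by
            rw [wsB_go]
            simp only [Nat.succ_ne_zero, dite_false, hn, if_false, hr, dite_false]
            rw [← ht]
          have hsplit : m + 1 = t.toNat + (m + 1 - t.toNat) := by omega
          have hA : wsA_go n (m + 1) = wsA_go (n - t.toNat) (m + 1 - t.toNat) := by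
            conv_lhs => rw [hsplit]
            exact wsA_go_chunk _ _ _ (by rw [htn]; exact htle)
          rw [hA, hB, htn]
          exact ih (m + 1 - t.toNat) (by omega) _

-- ===== VERDICT (by name: the statement is the Claim_ definition above) =====
theorem weirdSubtract_spec : Claim_equal_weirdSubtract := by
  intro n k _
  show weirdSubtract n k = weirdSubtract_alt n k
  exact wsA_eq_wsB k.toNat n
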